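-- pv_equiv track=rewrite | github.com/Hengle/XXMITools | migoto/export_ops.py | checkEnclosedFacesVertex
-- ===== SOURCE A (Python) =====
-- def recursive_connections(Over2_connected_points) -> bool:
--     for entry, connectedpointentry in Over2_connected_points.items():
--         if len(connectedpointentry & Over2_connected_points.keys()) < 2:
--             Over2_connected_points.pop(entry)
--             if len(Over2_connected_points) < 3:
--                 return False
--             return recursive_connections(Over2_connected_points)
--     return True
--
-- def checkEnclosedFacesVertex(
--     ConnectedFaces, vg_set, Precalculated_Outline_data
-- ) -> bool:
--     Main_connected_points = {}
--     # connected points non-same vertex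
--     for face in ConnectedFaces:
--         non_vg_points = [p for p in face if p not in vg_set]
--         if len(non_vg_points) > 1:
--             for point in non_vg_points:
--                 Main_connected_points.setdefault(point, []).extend(
--                     [x for x in non_vg_points if x != point]
--                 )
--         # connected points same vertex
--     New_Main_connect = {}
--     for entry, value in Main_connected_points.items():
--         for val in value:
--             ivspv = Precalculated_Outline_data.get("Same_Vertex").get(val) - {val}
--             intersect_sidevertex = ivspv & Main_connected_points.keys()
--             if intersect_sidevertex:
--                 New_Main_connect.setdefault(entry, []).extend(
--                     list(intersect_sidevertex)
--                 )
--         # connected points same vertex reverse connection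
--     for key, value in New_Main_connect.items():
--         Main_connected_points.get(key).extend(value)
--         for val in value:
--             Main_connected_points.get(val).append(key)
--         # exclude for only 2 way paths
--     Over2_connected_points = {
--         k: set(v) for k, v in Main_connected_points.items() if len(v) > 1
--     }
--
--     return recursive_connections(Over2_connected_points)
-- ===== SOURCE B (Python) =====
-- def checkEnclosedFacesVertex(ConnectedFaces, vg_set, Precalculated_Outline_data):
--     # Per-pair multiplicity counters instead of adjacency lists, then the 2-core
--     # computed by iterated simultaneous filtering instead of one-at-a-time
--     # pop-and-restart recursion.  Result: True iff the 2-core has >= 3 nodes or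
--     # no node was ever pruned (the initial graph is already its own 2-core).
--     mult = {}  # node -> {neighbour: multiplicity}
--     for face in ConnectedFaces:
--         pts = [p for p in face if p not in vg_set]
--         if len(pts) > 1:
--             for p in pts:
--                 row = mult.setdefault(p, {})
--                 for q in pts:
--                     if q != p:
--                         row[q] = row.get(q, 0) + 1
--     sv = Precalculated_Outline_data.get("Same_Vertex", {})
--     keys = mult.keys()
--     extra = {}  # same-vertex additions, also as counters
--     for entry, row in mult.items():
--         for val, m in row.items():
--             inter = (sv[val] - {val}) & keys
--             if inter:
--                 e = extra.setdefault(entry, {})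
--                 for w in inter:
--                     e[w] = e.get(w, 0) + m
--     for key, adds in extra.items():
--         krow = mult[key]
--         for w, a in adds.items():
--             krow[w] = krow.get(w, 0) + a
--             wrow = mult[w]
--             wrow[key] = wrow.get(key, 0) + a
--     alive = {p for p, row in mult.items() if sum(row.values()) > 1}
--     start = len(alive)
--     while True:
--         keep = {p for p in alive if len(mult[p].keys() & alive) >= 2}
--         if len(keep) == len(alive):
--             break
--         alive = keep
--     return len(alive) >= 3 or len(alive) == start
-- ===== Notes on version B (the rewrite author's own statement) =====
-- stated objective: alternative
-- what changed: B stores per-pair multiplicity counters (dict of Counters) instead of A's ever-growing adjacency lists, and computes the 2-core by iterated simultaneous filtering of the whole alive set instead of A's pop-one-node-and-recurse scan, returning True iff the 2-core has >= 3 nodes or nothing was pruned.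
import Mathlib
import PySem

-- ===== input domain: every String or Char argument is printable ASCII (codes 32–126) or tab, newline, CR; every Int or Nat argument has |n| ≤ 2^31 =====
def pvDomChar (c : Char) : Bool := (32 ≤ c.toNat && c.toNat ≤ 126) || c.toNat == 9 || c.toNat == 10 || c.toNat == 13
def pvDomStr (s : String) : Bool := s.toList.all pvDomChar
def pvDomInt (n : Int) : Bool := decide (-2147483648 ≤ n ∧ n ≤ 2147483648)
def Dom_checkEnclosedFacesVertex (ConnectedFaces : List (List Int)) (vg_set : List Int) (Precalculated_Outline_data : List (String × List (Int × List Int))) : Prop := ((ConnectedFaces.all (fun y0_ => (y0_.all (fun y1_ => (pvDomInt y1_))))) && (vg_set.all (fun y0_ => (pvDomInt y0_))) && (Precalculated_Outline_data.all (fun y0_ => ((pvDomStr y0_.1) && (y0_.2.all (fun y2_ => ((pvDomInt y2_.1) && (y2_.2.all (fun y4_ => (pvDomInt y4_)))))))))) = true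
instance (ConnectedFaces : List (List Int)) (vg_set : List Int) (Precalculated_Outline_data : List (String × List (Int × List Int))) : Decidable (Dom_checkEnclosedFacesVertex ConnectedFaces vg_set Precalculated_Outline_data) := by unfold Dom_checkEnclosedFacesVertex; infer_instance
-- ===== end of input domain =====

-- B replaces A's adjacency lists by per-pair multiplicity counters and A's
-- pop-one-node-and-recurse pruning by an iterated simultaneous filtering that
-- computes the 2-core; equivalence of the return values is proved on Pre_.

-- ===== PORT A =====
-- recursive_connections: pop the first entry with < 2 connections inside the
-- current key set; False as soon as fewer than 3 entries remain, True at a fixpoint.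
def pvRecConn (d : List (Int × List Int)) : Bool :=
  match h : d.find? (fun kv => decide ((kv.2.filter (fun x => (d.map Prod.fst).contains x)).length < 2)) with
  | none => true
  | some kv =>
    let d' := d.filter (fun p => p.1 != kv.1)
    if d'.length < 3 then false else pvRecConn d'
termination_by d.length
decreasing_by
  simp only [d', List.length_unattach]
  refine lt_of_lt_of_le (List.length_filter_lt_length_iff_exists.mpr
    ⟨⟨kv, List.mem_of_find?_eq_some h⟩, List.mem_attach _ _, by simp⟩) (by simp)

def checkEnclosedFacesVertex (ConnectedFaces : List (List Int)) (vg_set : List Int) (Precalculated_Outline_data : List (String × List (Int × List Int))) : Bool :=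
  -- Main_connected_points: dict point -> list of connected points (with multiplicity)
  let Main : PySem.Dict Int (List Int) := ConnectedFaces.foldl (fun Main face =>
    let non_vg_points := face.filter (fun p => !vg_set.contains p)
    if 1 < non_vg_points.length then
      non_vg_points.foldl (fun Main point =>
        Main.modify point [] (· ++ non_vg_points.filter (fun x => x != point))) Main
    else Main) PySem.Dict.empty
  -- connected points same vertex; the two .getD [] defaults stand where Python
  -- raises on a missing "Same_Vertex" key / missing val key — excluded by Pre_
  let New : PySem.Dict Int (List Int) := Main.items.foldl (fun New ev =>
    ev.2.foldl (fun New val =>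
      let ivspv := (((PySem.Dict.mk (((PySem.Dict.mk Precalculated_Outline_data).get? "Same_Vertex").getD [])).get? val).getD []).filter (fun x => x != val)
      let inter := ivspv.filter (fun x => Main.contains x)
      if inter.isEmpty then New else New.modify ev.1 [] (· ++ inter)) New) PySem.Dict.empty
  -- reverse connection
  let Main2 : PySem.Dict Int (List Int) := New.items.foldl (fun M kv =>
    let M' := M.modify kv.1 [] (· ++ kv.2)
    kv.2.foldl (fun M val => M.modify val [] (· ++ [kv.1])) M') Main
  -- Over2_connected_points = {k: set(v) for k, v in Main.items() if len(v) > 1}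
  let Over2 : List (Int × List Int) := Main2.items.filterMap (fun kv =>
    if 1 < kv.2.length then some (kv.1, PySem.Set.ofList kv.2) else none)
  pvRecConn Over2

-- ===== PORT B =====
-- 2-core by iterated simultaneous filtering (Source B's while loop)
def pvCore (mult : PySem.Dict Int (PySem.Dict Int Int)) (alive : List Int) : List Int :=
  let keep := alive.filter (fun p => 2 ≤ ((mult.getD p PySem.Dict.empty).keys.filter (fun q => alive.contains q)).length)
  if keep.length = alive.length then alive else pvCore mult keep
termination_by alive.length
decreasing_by
  rename_i h
  refine lt_of_le_of_ne ?_ ?_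
  · simpa using List.length_filter_le _ alive.attach
  · simp only [keep, List.length_unattach] at h; simpa using h

def checkEnclosedFacesVertex_alt (ConnectedFaces : List (List Int)) (vg_set : List Int) (Precalculated_Outline_data : List (String × List (Int × List Int))) : Bool :=
  -- mult: node -> {neighbour: multiplicity}
  let mult : PySem.Dict Int (PySem.Dict Int Int) := ConnectedFaces.foldl (fun mult face =>
    let pts := face.filter (fun p => !vg_set.contains p)
    if 1 < pts.length then
      pts.foldl (fun mult p =>
        mult.insert p (pts.foldl (fun row q => if q != p then row.modify q 0 (· + 1) else row)
          (mult.getD p PySem.Dict.empty))) mult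
    else mult) PySem.Dict.empty
  -- same-vertex additions as counters; .getD [] defaults as in port A (see Pre_)
  let sv := ((PySem.Dict.mk Precalculated_Outline_data).get? "Same_Vertex").getD []
  let extra : PySem.Dict Int (PySem.Dict Int Int) := mult.items.foldl (fun extra er =>
    er.2.items.foldl (fun extra vm =>
      let inter := ((((PySem.Dict.mk sv).get? vm.1).getD []).filter (fun x => x != vm.1)).filter (fun x => mult.contains x)
      if inter.isEmpty then extra
      else extra.insert er.1 (inter.foldl (fun e w => e.modify w 0 (· + vm.2))
        (extra.getD er.1 PySem.Dict.empty))) extra) PySem.Dict.empty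
  let mult2 : PySem.Dict Int (PySem.Dict Int Int) := extra.items.foldl (fun M ka =>
    ka.2.items.foldl (fun M wa =>
      let M' := M.modify ka.1 PySem.Dict.empty (fun krow => krow.modify wa.1 0 (· + wa.2))
      M'.modify wa.1 PySem.Dict.empty (fun wrow => wrow.modify ka.1 0 (· + wa.2))) M) mult
  let alive : List Int := mult2.items.filterMap (fun pr => if 1 < pr.2.values.sum then some pr.1 else none)
  let start := alive.length
  let core := pvCore mult2 alive
  decide (3 ≤ core.length) || decide (core.length = start)

-- ===== PRECONDITION & SPEC =====
-- Pre_ excludes exactly the inputs where Python A raises: whenever some face has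
-- two distinct non-vg points (so phase 2 performs same-vertex lookups), the
-- "Same_Vertex" dict must exist and contain every non-vg point of such a face.
def Pre_checkEnclosedFacesVertex (ConnectedFaces : List (List Int)) (vg_set : List Int) (Precalculated_Outline_data : List (String × List (Int × List Int))) : Prop :=
  ∀ face ∈ ConnectedFaces,
    (∃ x ∈ face.filter (fun p => !vg_set.contains p), ∃ y ∈ face.filter (fun p => !vg_set.contains p), x ≠ y) →
    ((PySem.Dict.mk Precalculated_Outline_data).get? "Same_Vertex" ≠ none ∧
      ∀ p ∈ face.filter (fun p => !vg_set.contains p),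
        (PySem.Dict.mk (((PySem.Dict.mk Precalculated_Outline_data).get? "Same_Vertex").getD [])).contains p)
instance (ConnectedFaces : List (List Int)) (vg_set : List Int) (Precalculated_Outline_data : List (String × List (Int × List Int))) : Decidable (Pre_checkEnclosedFacesVertex ConnectedFaces vg_set Precalculated_Outline_data) := by unfold Pre_checkEnclosedFacesVertex; infer_instance

def pvWitness_checkEnclosedFacesVertex : List (List Int) × List Int × (List (String × List (Int × List Int))) :=
  ([[1, 2, 3], [1, 2]], [9], [("Same_Vertex", [(1, [2]), (2, []), (3, [])])])

def Spec_checkEnclosedFacesVertex (ConnectedFaces : List (List Int)) (vg_set : List Int) (Precalculated_Outline_data : List (String × List (Int × List Int))) (out : Bool) : Prop := out = checkEnclosedFacesVertex_alt ConnectedFaces vg_set Precalculated_Outline_data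
instance (ConnectedFaces : List (List Int)) (vg_set : List Int) (Precalculated_Outline_data : List (String × List (Int × List Int))) (out : Bool) : Decidable (Spec_checkEnclosedFacesVertex ConnectedFaces vg_set Precalculated_Outline_data out) := by unfold Spec_checkEnclosedFacesVertex; infer_instance

-- ===== CLAIM (what is proved, stated in full; the proofs are below) =====
def Claim_equal_checkEnclosedFacesVertex : Prop := ∀ (ConnectedFaces : List (List Int)) (vg_set : List Int) (Precalculated_Outline_data : List (String × List (Int × List Int))), Dom_checkEnclosedFacesVertex ConnectedFaces vg_set Precalculated_Outline_data → Pre_checkEnclosedFacesVertex ConnectedFaces vg_set Precalculated_Outline_data → Spec_checkEnclosedFacesVertex ConnectedFaces vg_set Precalculated_Outline_data (checkEnclosedFacesVertex ConnectedFaces vg_set Precalculated_Outline_data)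

-- ===== LEMMAS AND PROOFS =====

def pvDeg (N : Int → List Int) (S : List Int) (p : Int) : Nat :=
  ((N p).filter (fun q => S.contains q)).length

def pvFix (N : Int → List Int) (S : List Int) : List Int :=
  let keep := S.filter (fun p => decide (2 ≤ pvDeg N S p))
  if keep.length = S.length then S else pvFix N keep
termination_by S.length
decreasing_by
  rename_i h
  refine lt_of_le_of_ne ?_ ?_
  · simpa using List.length_filter_le _ S.attach
  · simp only [keep, List.length_unattach] at h; simpa using h

theorem pvDeg_mono (N : Int → List Int) {S T : List Int} (h : ∀ q ∈ T, q ∈ S) (p : Int) :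
    pvDeg N T p ≤ pvDeg N S p := by
  unfold pvDeg
  simp only [← List.countP_eq_length_filter]
  exact List.countP_mono_left (by intro x hx hm; simp only [List.contains_iff_mem, decide_eq_true_eq] at hm ⊢; exact h _ hm)

theorem pvFix_sublist (N : Int → List Int) (S : List Int) : (pvFix N S).Sublist S := by
  induction hn : S.length using Nat.strong_induction_on generalizing S with
  | _ n ih =>
    rw [pvFix.eq_1]
    split
    · exact List.Sublist.refl S
    · rename_i hne
      subst hn
      exact ((ih _ (lt_of_le_of_ne (by simpa using List.length_filter_le _ S) hne) _ rfl)).trans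
        List.filter_sublist

theorem pvFix_subset (N : Int → List Int) (S : List Int) : ∀ q ∈ pvFix N S, q ∈ S :=
  fun _ hq => (pvFix_sublist N S).mem hq

theorem pvFix_nodup (N : Int → List Int) {S : List Int} (h : S.Nodup) : (pvFix N S).Nodup :=
  (pvFix_sublist N S).nodup h

theorem pvFix_stable (N : Int → List Int) (S : List Int) :
    ∀ p ∈ pvFix N S, 2 ≤ pvDeg N (pvFix N S) p := by
  induction hn : S.length using Nat.strong_induction_on generalizing S with
  | _ n ih =>
    rw [pvFix.eq_1]
    split
    · rename_i he
      have hall := List.filter_eq_self.mp (List.Sublist.eq_of_length List.filter_sublist he)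
      intro p hp
      simpa using hall p hp
    · rename_i hne
      subst hn
      exact ih _ (lt_of_le_of_ne (by simpa using List.length_filter_le _ S) hne) _ rfl

theorem pvFix_max (N : Int → List Int) (S : List Int) (T : List Int)
    (hTS : ∀ p ∈ T, p ∈ S) (hst : ∀ p ∈ T, 2 ≤ pvDeg N T p) :
    ∀ p ∈ T, p ∈ pvFix N S := by
  induction hn : S.length using Nat.strong_induction_on generalizing S with
  | _ n ih =>
    rw [pvFix.eq_1]
    split
    · exact hTS
    · rename_i hne
      subst hn
      have hTk : ∀ p ∈ T, p ∈ S.filter (fun p => decide (2 ≤ pvDeg N S p)) := by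
        intro p hp
        exact List.mem_filter.mpr ⟨hTS p hp, by
          simpa using le_trans (hst p hp) (pvDeg_mono N hTS p)⟩
      exact ih _ (lt_of_le_of_ne (by simpa using List.length_filter_le _ S) hne) _ hTk rfl

theorem pvDeg_congr {N N' : Int → List Int} (p : Int) (S : List Int)
    (hm : ∀ q, q ∈ N p ↔ q ∈ N' p) (h1 : (N p).Nodup) (h2 : (N' p).Nodup) :
    pvDeg N S p = pvDeg N' S p := by
  unfold pvDeg
  exact List.Perm.length_eq (List.Perm.filter _ ((List.perm_ext_iff_of_nodup h1 h2).mpr hm))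

theorem pvFix_congr {N N' : Int → List Int} (S : List Int)
    (hm : ∀ p ∈ S, ∀ q, q ∈ N p ↔ q ∈ N' p)
    (h1 : ∀ p ∈ S, (N p).Nodup) (h2 : ∀ p ∈ S, (N' p).Nodup) :
    pvFix N S = pvFix N' S := by
  induction hn : S.length using Nat.strong_induction_on generalizing S with
  | _ n ih =>
    conv_lhs => rw [pvFix.eq_1]
    conv_rhs => rw [pvFix.eq_1]
    have hkeep : S.filter (fun p => decide (2 ≤ pvDeg N S p)) =
        S.filter (fun p => decide (2 ≤ pvDeg N' S p)) := by
      apply List.filter_congr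
      intro p hp
      rw [pvDeg_congr p S (hm p hp) (h1 p hp) (h2 p hp)]
    rw [← hkeep]
    split
    · rfl
    · rename_i hne
      subst hn
      have hsub : ∀ p ∈ S.filter (fun p => decide (2 ≤ pvDeg N S p)), p ∈ S :=
        fun p hp => List.mem_of_mem_filter hp
      rw [hkeep]
      rw [← hkeep]
      exact ih _ (lt_of_le_of_ne (by simpa using List.length_filter_le _ S) hne) _
        (fun p hp => hm p (hsub p hp)) (fun p hp => h1 p (hsub p hp))
        (fun p hp => h2 p (hsub p hp)) rfl

theorem pvFix_erase {N N' : Int → List Int} {S : List Int} (hS : S.Nodup) {k : Int}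
    (hkS : k ∈ S) (hdeg : pvDeg N S k < 2)
    (hN' : ∀ p ∈ S, p ≠ k → N' p = N p)
    (hnd : ∀ p ∈ S, (N p).Nodup) (hnd' : ∀ p ∈ S, (N' p).Nodup) :
    (pvFix N' (S.filter (fun p => p != k))).length = (pvFix N S).length := by
  set S' := S.filter (fun p => p != k) with hS'
  have hmemS' : ∀ p, p ∈ S' ↔ p ∈ S ∧ p ≠ k := by
    intro p; simp [hS', List.mem_filter]
  have hkC : k ∉ pvFix N S := by
    intro hk
    exact absurd (le_trans (pvFix_stable N S k hk) (pvDeg_mono N (pvFix_subset N S) k))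
      (by omega)
  have hCS' : ∀ p ∈ pvFix N S, p ∈ S' := by
    intro p hp
    exact (hmemS' p).mpr ⟨pvFix_subset N S p hp, fun he => hkC (he ▸ hp)⟩
  have hdegNN' : ∀ p ∈ S, p ≠ k → ∀ T, pvDeg N' T p = pvDeg N T p := by
    intro p hp hpk T; unfold pvDeg; rw [hN' p hp hpk]
  -- pvFix N S ⊆ pvFix N' S'
  have h1 : ∀ p ∈ pvFix N S, p ∈ pvFix N' S' := by
    apply pvFix_max N' S' (pvFix N S) hCS'
    intro p hp
    have hpS := pvFix_subset N S p hp
    have hpk : p ≠ k := fun he => hkC (he ▸ hp)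
    rw [hdegNN' p hpS hpk]
    exact pvFix_stable N S p hp
  -- pvFix N' S' ⊆ pvFix N S
  have h2 : ∀ p ∈ pvFix N' S', p ∈ pvFix N S := by
    apply pvFix_max N S (pvFix N' S')
      (fun p hp => ((hmemS' p).mp (pvFix_subset N' S' p hp)).1)
    intro p hp
    have hpS' := pvFix_subset N' S' p hp
    have hpS := ((hmemS' p).mp hpS').1
    have hpk := ((hmemS' p).mp hpS').2
    rw [← hdegNN' p hpS hpk]
    exact pvFix_stable N' S' p hp
  exact List.Perm.length_eq ((List.perm_ext_iff_of_nodup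
    (pvFix_nodup N' (List.Nodup.filter _ hS)) (pvFix_nodup N hS)).mpr
    (fun q => ⟨h2 q, h1 q⟩))

def pvN (d : List (Int × List Int)) (p : Int) : List Int :=
  ((d.find? (fun kv => kv.1 == p)).map Prod.snd).getD []

theorem pv_find?_filter {α : Type} (P Q : α → Bool) (l : List α)
    (h : ∀ x, P x = true → Q x = true) : (l.filter Q).find? P = l.find? P := by
  induction l with
  | nil => rfl
  | cons a t ih =>
    by_cases hQ : Q a = true
    · rw [List.filter_cons_of_pos hQ]
      by_cases hP : P a = true
      · rw [List.find?_cons_of_pos hP, List.find?_cons_of_pos hP]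
      · rw [List.find?_cons_of_neg (by simpa using hP), List.find?_cons_of_neg (by simpa using hP), ih]
    · rw [List.filter_cons_of_neg (by simpa using hQ), ih,
        List.find?_cons_of_neg (fun hP => hQ (h a hP))]

theorem pvN_filter (d : List (Int × List Int)) (k p : Int) (hp : p ≠ k) :
    pvN (d.filter (fun q => q.1 != k)) p = pvN d p := by
  unfold pvN
  rw [pv_find?_filter]
  intro x hx
  simp only [beq_iff_eq] at hx
  simp [hx, hp]

theorem pvN_eq {d : List (Int × List Int)} (hk : (d.map Prod.fst).Nodup)
    {kv : Int × List Int} (hm : kv ∈ d) : pvN d kv.1 = kv.2 := by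
  unfold pvN
  induction d with
  | nil => cases hm
  | cons a t ih =>
    rcases List.mem_cons.mp hm with h | h
    · subst h; simp
    · have ha : a.1 ≠ kv.1 := by
        intro he
        have : kv.1 ∈ t.map Prod.fst := List.mem_map.mpr ⟨kv, h, rfl⟩
        simp only [List.map_cons, List.nodup_cons] at hk
        exact hk.1 (he ▸ this)
      rw [List.find?_cons_of_neg (by simpa using ha)]
      exact ih (by simp only [List.map_cons, List.nodup_cons] at hk; exact hk.2) h

theorem pv_map_fst_filter (d : List (Int × List Int)) (k : Int) :
    (d.filter (fun p => p.1 != k)).map Prod.fst = (d.map Prod.fst).filter (fun p => p != k) := by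
  induction d with
  | nil => rfl
  | cons a t iht =>
    simp only [List.filter_cons, List.map_cons]
    cases hb : (a.1 != k) <;> simp [hb, iht]

theorem pvN_nodup {d : List (Int × List Int)} (hv : ∀ kv ∈ d, kv.2.Nodup) (p : Int) :
    (pvN d p).Nodup := by
  unfold pvN
  cases hf : d.find? (fun kv => kv.1 == p) with
  | none => simp
  | some kv => simpa using hv kv (List.mem_of_find?_eq_some hf)

theorem pvRecConn_eq (d : List (Int × List Int)) (hk : (d.map Prod.fst).Nodup)
    (hv : ∀ kv ∈ d, kv.2.Nodup) :
    pvRecConn d = (decide (3 ≤ (pvFix (pvN d) (d.map Prod.fst)).length) ||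
      decide ((pvFix (pvN d) (d.map Prod.fst)).length = (d.map Prod.fst).length)) := by
  induction hn : d.length using Nat.strong_induction_on generalizing d with
  | _ n ih =>
    rw [pvRecConn]
    split
    · rename_i hfind
      -- no prunable entry: the fixpoint is S itself
      have hall : ∀ kv ∈ d, 2 ≤ pvDeg (pvN d) (d.map Prod.fst) kv.1 := by
        intro kv hkv
        have := List.find?_eq_none.mp hfind kv hkv
        simp only [decide_eq_true_eq, not_lt] at this
        unfold pvDeg
        rw [pvN_eq hk hkv]
        exact this
      have : pvFix (pvN d) (d.map Prod.fst) = d.map Prod.fst := by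
        rw [pvFix.eq_1]
        have : (d.map Prod.fst).filter (fun p => decide (2 ≤ pvDeg (pvN d) (d.map Prod.fst) p)) = d.map Prod.fst := by
          apply List.filter_eq_self.mpr
          intro p hp
          obtain ⟨kv, hkv, rfl⟩ := List.mem_map.mp hp
          simpa using hall kv hkv
        simp [this]
      simp [this]
    · rename_i kv hfind
      have hkvd : kv ∈ d := List.mem_of_find?_eq_some hfind
      have hpred := List.find?_some hfind
      simp only [decide_eq_true_eq] at hpred
      have hdeg : pvDeg (pvN d) (d.map Prod.fst) kv.1 < 2 := by
        unfold pvDeg; rw [pvN_eq hk hkvd]; exact hpred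
      set d' := d.filter (fun p => p.1 != kv.1) with hd'
      have hkeys' : d'.map Prod.fst = (d.map Prod.fst).filter (fun p => p != kv.1) := by
        rw [hd']; exact pv_map_fst_filter d kv.1
      have hk' : (d'.map Prod.fst).Nodup := by
        rw [hkeys']; exact List.Nodup.filter _ hk
      have hv' : ∀ kv' ∈ d', kv'.2.Nodup := fun kv' h => hv kv' (List.mem_of_mem_filter h)
      have hkS : kv.1 ∈ d.map Prod.fst := List.mem_map.mpr ⟨kv, hkvd, rfl⟩
      have hlen : (pvFix (pvN d') (d'.map Prod.fst)).length =
          (pvFix (pvN d) (d.map Prod.fst)).length := by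
        rw [hkeys']
        exact pvFix_erase hk hkS hdeg
          (fun p _ hpk => pvN_filter d kv.1 p hpk)
          (fun p _ => pvN_nodup hv p) (fun p _ => pvN_nodup hv' p)
      have hlenS' : (d'.map Prod.fst).length < (d.map Prod.fst).length := by
        rw [hkeys']
        exact List.length_filter_lt_length_iff_exists.mpr ⟨kv.1, hkS, by simp⟩
      have hxle : (pvFix (pvN d) (d.map Prod.fst)).length ≤ (d'.map Prod.fst).length := by
        rw [← hlen]
        exact (pvFix_sublist _ _).length_le
      have hdlen : d'.length = (d'.map Prod.fst).length := by simp
      have hdlen2 : d.length = (d.map Prod.fst).length := by simp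
      set x := (pvFix (pvN d) (d.map Prod.fst)).length with hx
      dsimp only
      split
      · rename_i hlt3
        -- fewer than 3 entries remain: A returns false; the fixpoint is small and proper
        rw [decide_eq_false (show ¬ (3 ≤ x) by omega),
          decide_eq_false (show ¬ (x = (d.map Prod.fst).length) by omega)]
        rfl
      · rename_i hge3
        have hrec := ih d'.length (by omega) d' hk' hv' rfl
        rw [hrec, hlen]
        by_cases h3 : 3 ≤ x
        · rw [decide_eq_true h3]; simp
        · rw [decide_eq_false h3,
            decide_eq_false (show ¬ (x = (d'.map Prod.fst).length) by omega),
            decide_eq_false (show ¬ (x = (d.map Prod.fst).length) by omega)]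

-- ===== basic invariants =====
def pvRowOk (r : PySem.Dict Int Int) : Prop :=
  r.keys.Nodup ∧ ∀ q, q ∈ r.keys ↔ 0 < r.getD q 0

def pvRel (M : PySem.Dict Int (List Int)) (B : PySem.Dict Int (PySem.Dict Int Int)) : Prop :=
  M.keys = B.keys ∧ M.keys.Nodup ∧ (∀ k, pvRowOk (B.getD k PySem.Dict.empty)) ∧
  ∀ k q, (B.getD k PySem.Dict.empty).getD q 0 = ((M.getD k []).count q : Int)

theorem pvRowOk_empty : pvRowOk (PySem.Dict.empty (κ := Int) (ν := Int)) := by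
  constructor <;> simp [PySem.Dict.keys, PySem.Dict.empty, PySem.Dict.getD, PySem.Dict.get?]

theorem pvRel_empty : pvRel PySem.Dict.empty PySem.Dict.empty := by
  refine ⟨rfl, by simp [PySem.Dict.keys, PySem.Dict.empty], fun k => ?_, fun k q => ?_⟩
  · have : (PySem.Dict.empty (κ := Int) (ν := PySem.Dict Int Int)).getD k PySem.Dict.empty = PySem.Dict.empty := rfl
    rw [this]; exact pvRowOk_empty
  · rfl

theorem pvRowOk_getD_nonneg {r} (h : pvRowOk r) (q : Int) : 0 ≤ r.getD q 0 := by
  by_cases hc : r.contains q = true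
  · exact le_of_lt ((h.2 q).mp ((PySem.Dict.contains_iff_mem_keys r q).mp hc))
  · rw [PySem.Dict.getD_of_not_contains r 0 (by simpa using hc)]

theorem pvRel_contains_eq {M B} (h : pvRel M B) (x : Int) :
    M.contains x = B.contains x := by
  rw [PySem.Dict.contains_eq_decide_mem_keys, PySem.Dict.contains_eq_decide_mem_keys, h.1]

theorem pvRowOk_modify_add {r} (h : pvRowOk r) {a : Int} (ha : 0 < a) (w : Int) :
    pvRowOk (r.modify w 0 (· + a)) := by
  have hnn := pvRowOk_getD_nonneg h
  refine ⟨by rw [PySem.Dict.keys_modify]; exact PySem.Dict.nodup_keys_insert _ _ _ h.1, fun q => ?_⟩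
  rw [PySem.Dict.keys_modify, PySem.Dict.mem_keys_insert, PySem.Dict.getD_modify]
  by_cases hqw : q = w
  · subst hqw
    rw [if_pos rfl]
    constructor
    · intro _; have := hnn q; omega
    · intro _; left; rfl
  · rw [if_neg hqw]
    simp only [hqw, false_or]
    exact h.2 q

theorem pv_getD_foldl_modify_add (l : List Int) (e : PySem.Dict Int Int) (m q : Int) :
    ((l.foldl (fun e w => e.modify w 0 (· + m)) e).getD q 0) = e.getD q 0 + m * (l.count q : Int) := by
  induction l generalizing e with
  | nil => simp
  | cons w t ih =>
    rw [List.foldl_cons, ih, PySem.Dict.getD_modify]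
    by_cases hq : q = w
    · subst hq; rw [if_pos rfl, List.count_cons_self]; push_cast; ring
    · rw [if_neg hq, List.count_cons_of_ne (by simpa [eq_comm] using hq)]

theorem pv_keys_foldl_modify_add (l : List Int) (e : PySem.Dict Int Int) (m : Int) :
    (l.foldl (fun e w => e.modify w 0 (· + m)) e).keys = PySem.Set.update e.keys l := by
  have := PySem.Dict.keys_foldl_modify_key l (fun x : Int => x) 0 (fun _ _ => (· + m)) e
  simpa using this

theorem pvRowOk_foldl_modify_add (l : List Int) {e : PySem.Dict Int Int} {m : Int}
    (hm : 0 < m) (he : pvRowOk e) :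
    pvRowOk (l.foldl (fun e w => e.modify w 0 (· + m)) e) := by
  induction l generalizing e with
  | nil => exact he
  | cons w t ih => exact ih (pvRowOk_modify_add he hm w)

-- keys of a modify as a set-add
theorem pv_keys_modify_add {ν : Type} (d : PySem.Dict Int ν) (k : Int) (d0 : ν) (f : ν → ν) :
    (d.modify k d0 f).keys = PySem.Set.add d.keys k := by
  rw [PySem.Dict.keys_modify]
  by_cases hc : d.contains k = true
  · rw [PySem.Dict.keys_insert_of_contains _ _ hc,
      PySem.Set.add_of_mem ((PySem.Dict.contains_iff_mem_keys d k).mp hc)]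
  · rw [PySem.Dict.keys_insert_of_not_contains _ _ (by simpa using hc),
      PySem.Set.add_of_not_mem (fun hm => hc ((PySem.Dict.contains_iff_mem_keys d k).mpr hm))]

theorem pv_keys_insert_add {ν : Type} (d : PySem.Dict Int ν) (k : Int) (v : ν) :
    (d.insert k v).keys = PySem.Set.add d.keys k := by
  by_cases hc : d.contains k = true
  · rw [PySem.Dict.keys_insert_of_contains _ _ hc,
      PySem.Set.add_of_mem ((PySem.Dict.contains_iff_mem_keys d k).mp hc)]
  · rw [PySem.Dict.keys_insert_of_not_contains _ _ (by simpa using hc),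
      PySem.Set.add_of_not_mem (fun hm => hc ((PySem.Dict.contains_iff_mem_keys d k).mpr hm))]

theorem pv_keys_modify_of_contains {ν : Type} (d : PySem.Dict Int ν) {k : Int} (d0 : ν) (f : ν → ν)
    (hc : d.contains k = true) : (d.modify k d0 f).keys = d.keys := by
  rw [pv_keys_modify_add, PySem.Set.add_of_mem ((PySem.Dict.contains_iff_mem_keys d k).mp hc)]

-- ===== phase 1 =====
theorem pvStep1 {M B} (h : pvRel M B) (p : Int) (X : List Int) :
    pvRel (M.modify p [] (· ++ X))
      (B.insert p (X.foldl (fun row q => row.modify q 0 (· + 1)) (B.getD p PySem.Dict.empty))) := by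
  obtain ⟨hkeys, hnd, hrow, hcnt⟩ := h
  refine ⟨?_, ?_, ?_, ?_⟩
  · rw [pv_keys_modify_add, pv_keys_insert_add, hkeys]
  · rw [pv_keys_modify_add]
    by_cases hm : p ∈ M.keys
    · rw [PySem.Set.add_of_mem hm]; exact hnd
    · rw [PySem.Set.add_of_not_mem hm]
      rw [List.nodup_append]
      exact ⟨hnd, List.nodup_singleton _, by simpa using fun a ha hap => hm ((hap : a = p) ▸ ha)⟩
  · intro k
    rw [PySem.Dict.getD_insert]
    by_cases hk : k = p
    · rw [if_pos hk]
      constructor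
      · rw [pv_keys_foldl_modify_add]
        exact PySem.Set.nodup_update _ _ (hrow p).1
      · intro q
        rw [pv_keys_foldl_modify_add, PySem.Set.mem_update,
          pv_getD_foldl_modify_add]
        have h1 := (hrow p).2 q
        have h2 := pvRowOk_getD_nonneg (hrow p) q
        rw [h1]
        constructor
        · rintro (hq | hq)
          · omega
          · have := List.count_pos_iff.mpr hq; omega
        · intro hq
          by_cases hx : q ∈ X
          · right; exact hx
          · left
            have : X.count q = 0 := List.count_eq_zero.mpr hx
            omega
    · rw [if_neg hk]; exact hrow k
  · intro k q
    rw [PySem.Dict.getD_insert]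
    have hmod : (M.modify p [] (· ++ X)) = M.insert p ((M.getD p []) ++ X) := rfl
    rw [hmod, PySem.Dict.getD_insert]
    by_cases hk : k = p
    · rw [if_pos hk, if_pos hk, pv_getD_foldl_modify_add, List.count_append, hcnt p q]
      push_cast; ring
    · rw [if_neg hk, if_neg hk]; exact hcnt k q

theorem pvPhase1_inner (pts0 : List Int) (l : List Int) {M B} (h : pvRel M B) :
    pvRel (l.foldl (fun Main point => Main.modify point [] (· ++ pts0.filter (fun x => x != point))) M)
      (l.foldl (fun mult p => mult.insert p ((pts0.filter (fun q => q != p)).foldl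
        (fun row q => row.modify q 0 (· + 1)) (mult.getD p PySem.Dict.empty))) B) := by
  induction l generalizing M B with
  | nil => exact h
  | cons p t ih => exact ih (pvStep1 h p (pts0.filter (fun x => x != p)))

theorem pvPhase1 (CF : List (List Int)) (vg_set : List Int) {M B} (h : pvRel M B) :
    pvRel
      (CF.foldl (fun Main face =>
        let non_vg_points := face.filter (fun p => !vg_set.contains p)
        if 1 < non_vg_points.length then
          non_vg_points.foldl (fun Main point =>
            Main.modify point [] (· ++ non_vg_points.filter (fun x => x != point))) Main
        else Main) M)
      (CF.foldl (fun mult face =>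
        let pts := face.filter (fun p => !vg_set.contains p)
        if 1 < pts.length then
          pts.foldl (fun mult p =>
            mult.insert p (pts.foldl (fun row q => if q != p then row.modify q 0 (· + 1) else row)
              (mult.getD p PySem.Dict.empty))) mult
        else mult) B) := by
  induction CF generalizing M B with
  | nil => exact h
  | cons face t ih =>
    rw [List.foldl_cons, List.foldl_cons]
    apply ih
    dsimp only
    split
    · have hrw : ∀ (p : Int) (r : PySem.Dict Int Int),
          (face.filter (fun p => !vg_set.contains p)).foldl
            (fun row q => if q != p then row.modify q 0 (· + 1) else row) r =
          ((face.filter (fun p => !vg_set.contains p)).filter (fun q => q != p)).foldl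
            (fun row q => row.modify q 0 (· + 1)) r := by
        intro p r
        exact PySem.List.foldl_if_eq_foldl_filter (fun q => q != p) (fun row q => row.modify q 0 (· + 1)) _ r
      simp only [hrw]
      exact pvPhase1_inner _ _ h
    · exact h

-- ===== phase 2 =====
theorem pvE2A (g : Int → List Int) (k : Int) (vl : List Int) (New : PySem.Dict Int (List Int)) :
    ((vl.foldl (fun New val => if (g val).isEmpty then New else New.modify k [] (· ++ g val)) New).getD k []
        = New.getD k [] ++ vl.flatMap g)
    ∧ (∀ k', k' ≠ k → (vl.foldl (fun New val => if (g val).isEmpty then New else New.modify k [] (· ++ g val)) New).getD k' []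
        = New.getD k' [])
    ∧ ((vl.foldl (fun New val => if (g val).isEmpty then New else New.modify k [] (· ++ g val)) New).keys
        = if vl.any (fun val => !(g val).isEmpty) then PySem.Set.add New.keys k else New.keys) := by
  induction vl generalizing New with
  | nil => simp
  | cons val t ih =>
    rw [List.foldl_cons]
    by_cases he : (g val).isEmpty
    · rw [if_pos he]
      have hnil : g val = [] := List.isEmpty_iff.mp he
      obtain ⟨ih1, ih2, ih3⟩ := ih New
      refine ⟨by rw [ih1]; simp [hnil], ih2, ?_⟩
      rw [ih3]
      simp [he]
    · rw [if_neg he]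
      obtain ⟨ih1, ih2, ih3⟩ := ih (New.modify k [] (· ++ g val))
      refine ⟨?_, ?_, ?_⟩
      · rw [ih1, PySem.Dict.getD_modify, if_pos rfl]
        simp
      · intro k' hk'
        rw [ih2 k' hk', PySem.Dict.getD_modify, if_neg hk']
      · rw [ih3, pv_keys_modify_add]
        have hadd : PySem.Set.add (PySem.Set.add New.keys k) k = PySem.Set.add New.keys k :=
          PySem.Set.add_of_mem (by rw [PySem.Set.mem_add]; right; rfl)
        simp [he, hadd]

theorem pvE2B (g : Int → List Int) (k : Int) (L : List (Int × Int)) (extra : PySem.Dict Int (PySem.Dict Int Int))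
    (hpos : ∀ wa ∈ L, 0 < wa.2) (hok : ∀ k', pvRowOk (extra.getD k' PySem.Dict.empty)) :
    (∀ q, ((L.foldl (fun extra vm => if (g vm.1).isEmpty then extra else
        extra.insert k ((g vm.1).foldl (fun e w => e.modify w 0 (· + vm.2)) (extra.getD k PySem.Dict.empty))) extra).getD k PySem.Dict.empty).getD q 0
        = (extra.getD k PySem.Dict.empty).getD q 0 + (L.map (fun vm => vm.2 * ((g vm.1).count q : Int))).sum)
    ∧ (∀ k', k' ≠ k → (L.foldl (fun extra vm => if (g vm.1).isEmpty then extra else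
        extra.insert k ((g vm.1).foldl (fun e w => e.modify w 0 (· + vm.2)) (extra.getD k PySem.Dict.empty))) extra).getD k' PySem.Dict.empty
        = extra.getD k' PySem.Dict.empty)
    ∧ ((L.foldl (fun extra vm => if (g vm.1).isEmpty then extra else
        extra.insert k ((g vm.1).foldl (fun e w => e.modify w 0 (· + vm.2)) (extra.getD k PySem.Dict.empty))) extra).keys
        = if L.any (fun vm => !(g vm.1).isEmpty) then PySem.Set.add extra.keys k else extra.keys)
    ∧ (∀ k', pvRowOk ((L.foldl (fun extra vm => if (g vm.1).isEmpty then extra else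
        extra.insert k ((g vm.1).foldl (fun e w => e.modify w 0 (· + vm.2)) (extra.getD k PySem.Dict.empty))) extra).getD k' PySem.Dict.empty)) := by
  induction L generalizing extra with
  | nil => simp [hok]
  | cons vm t ih =>
    rw [List.foldl_cons]
    have hposvm : 0 < vm.2 := hpos vm List.mem_cons_self
    have hpost : ∀ wa ∈ t, 0 < wa.2 := fun wa hw => hpos wa (List.mem_cons_of_mem _ hw)
    by_cases he : (g vm.1).isEmpty
    · rw [if_pos he]
      have hnil : g vm.1 = [] := List.isEmpty_iff.mp he
      obtain ⟨ih1, ih2, ih3, ih4⟩ := ih extra hpost hok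
      refine ⟨fun q => by rw [ih1 q]; simp [hnil], ih2, by rw [ih3, List.any_cons, hnil]; simp only [List.isEmpty_nil, Bool.not_true, Bool.false_or], ih4⟩
    · rw [if_neg he]
      set extra' := extra.insert k ((g vm.1).foldl (fun e w => e.modify w 0 (· + vm.2)) (extra.getD k PySem.Dict.empty)) with hextra'
      have hok' : ∀ k', pvRowOk (extra'.getD k' PySem.Dict.empty) := by
        intro k'
        rw [hextra', PySem.Dict.getD_insert]
        by_cases hk' : k' = k
        · rw [if_pos hk']
          exact pvRowOk_foldl_modify_add _ hposvm (hok k)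
        · rw [if_neg hk']; exact hok k'
      obtain ⟨ih1, ih2, ih3, ih4⟩ := ih extra' hpost hok'
      refine ⟨?_, ?_, ?_, ih4⟩
      · intro q
        rw [ih1 q, hextra', PySem.Dict.getD_insert, if_pos rfl, pv_getD_foldl_modify_add]
        simp only [List.map_cons, List.sum_cons]
        ring
      · intro k' hk'
        rw [ih2 k' hk', hextra', PySem.Dict.getD_insert, if_neg hk']
      · rw [ih3, hextra', pv_keys_insert_add]
        have hadd : PySem.Set.add (PySem.Set.add extra.keys k) k = PySem.Set.add extra.keys k :=
          PySem.Set.add_of_mem (by rw [PySem.Set.mem_add]; right; rfl)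
        simp [he, hadd]

theorem pv_weighted_count (K : List Int) (hK : K.Nodup) (vl : List Int)
    (hmem : ∀ v, v ∈ K ↔ v ∈ vl) (f : Int → Int) :
    (K.map (fun v => (vl.count v : Int) * f v)).sum = (vl.map f).sum := by
  rw [Finset.sum_list_map_count vl f]
  rw [← List.sum_toFinset _ hK]
  have hfs : K.toFinset = vl.toFinset := by
    apply Finset.ext
    intro x
    simp [List.mem_toFinset, hmem]
  rw [hfs]
  exact Finset.sum_congr rfl (fun x _ => (nsmul_eq_mul _ _).symm)

theorem pvPhase2_outer (g : Int → List Int) {M : PySem.Dict Int (List Int)}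
    {B : PySem.Dict Int (PySem.Dict Int Int)} (hrel : pvRel M B)
    (K : List Int) (hKnd : K.Nodup) (hKM : ∀ k ∈ K, k ∈ M.keys)
    {New : PySem.Dict Int (List Int)} {extra : PySem.Dict Int (PySem.Dict Int Int)}
    (hkeq : New.keys = extra.keys) (hnnd : New.keys.Nodup) (hnm : ∀ k ∈ New.keys, k ∈ M.keys)
    (hcnt : ∀ k q, (extra.getD k PySem.Dict.empty).getD q 0 = ((New.getD k []).count q : Int))
    (hok : ∀ k, pvRowOk (extra.getD k PySem.Dict.empty))
    (hval : ∀ k q, q ∈ New.getD k [] → ∃ val, q ∈ g val) :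
    let FA := K.foldl (fun New k => (M.getD k []).foldl
      (fun New val => if (g val).isEmpty then New else New.modify k [] (· ++ g val)) New) New
    let FB := K.foldl (fun extra k => ((B.getD k PySem.Dict.empty).items).foldl
      (fun extra vm => if (g vm.1).isEmpty then extra else
        extra.insert k ((g vm.1).foldl (fun e w => e.modify w 0 (· + vm.2)) (extra.getD k PySem.Dict.empty))) extra) extra
    FA.keys = FB.keys ∧ FA.keys.Nodup ∧ (∀ k ∈ FA.keys, k ∈ M.keys) ∧
    (∀ k q, (FB.getD k PySem.Dict.empty).getD q 0 = ((FA.getD k []).count q : Int)) ∧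
    (∀ k, pvRowOk (FB.getD k PySem.Dict.empty)) ∧
    (∀ k q, q ∈ FA.getD k [] → ∃ val, q ∈ g val) := by
  induction K generalizing New extra with
  | nil => exact ⟨hkeq, hnnd, hnm, hcnt, hok, hval⟩
  | cons k t ih =>
    simp only [List.foldl_cons]
    -- data for this entry
    have hrownd : (B.getD k PySem.Dict.empty).keys.Nodup := (hrel.2.2.1 k).1
    have hpos : ∀ wa ∈ (B.getD k PySem.Dict.empty).items, 0 < wa.2 := by
      intro wa hwa
      have h1 : (B.getD k PySem.Dict.empty).getD wa.1 0 = wa.2 := by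
        obtain ⟨w1, w2⟩ := wa
        exact PySem.Dict.getD_of_mem_items _ hwa hrownd 0
      have h2 : wa.1 ∈ (B.getD k PySem.Dict.empty).keys := by
        have : wa.1 ∈ (B.getD k PySem.Dict.empty).items.map Prod.fst :=
          List.mem_map_of_mem hwa
        exact this
      have := ((hrel.2.2.1 k).2 wa.1).mp h2
      omega
    obtain ⟨e1, e2, e3⟩ := pvE2A g k (M.getD k []) New
    obtain ⟨f1, f2, f3, f4⟩ := pvE2B g k ((B.getD k PySem.Dict.empty).items) extra hpos hok
    -- any-conditions agree
    have hmemrow : ∀ v, v ∈ (B.getD k PySem.Dict.empty).keys ↔ v ∈ M.getD k [] := by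
      intro v
      rw [(hrel.2.2.1 k).2 v, hrel.2.2.2 k v]
      constructor
      · intro h; exact List.count_pos_iff.mp (by exact_mod_cast h)
      · intro h; exact_mod_cast List.count_pos_iff.mpr h
    have hany : ((M.getD k []).any (fun val => !(g val).isEmpty)) =
        ((B.getD k PySem.Dict.empty).items.any (fun vm => !(g vm.1).isEmpty)) := by
      rw [Bool.eq_iff_iff, List.any_eq_true, List.any_eq_true]
      constructor
      · rintro ⟨val, hv, hne⟩
        have hvk : val ∈ (B.getD k PySem.Dict.empty).keys := (hmemrow val).mpr hv
        rw [PySem.Dict.items_eq_map_keys _ hrownd 0]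
        exact ⟨(val, (B.getD k PySem.Dict.empty).getD val 0),
          List.mem_map_of_mem hvk, hne⟩
      · rintro ⟨vm, hv, hne⟩
        have : vm.1 ∈ (B.getD k PySem.Dict.empty).keys := List.mem_map_of_mem hv
        exact ⟨vm.1, (hmemrow vm.1).mp this, hne⟩
    -- new accumulators
    have hkeq' : (((M.getD k []).foldl (fun New val => if (g val).isEmpty then New
        else New.modify k [] (· ++ g val)) New)).keys =
        ((((B.getD k PySem.Dict.empty).items).foldl (fun extra vm => if (g vm.1).isEmpty then extra else
          extra.insert k ((g vm.1).foldl (fun e w => e.modify w 0 (· + vm.2)) (extra.getD k PySem.Dict.empty))) extra)).keys := by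
      rw [e3, f3, ← hany, hkeq]
    apply ih
    · exact hKnd.of_cons
    · exact fun k' hk' => hKM k' (List.mem_cons_of_mem _ hk')
    · exact hkeq'
    · rw [e3]
      split
      · exact PySem.Set.nodup_add _ _ hnnd
      · exact hnnd
    · intro k' hk'
      rw [e3] at hk'
      by_cases hc : ((M.getD k []).any fun val => !(g val).isEmpty) = true
      · rw [if_pos hc] at hk'
        rcases (PySem.Set.mem_add _ _ _).mp hk' with h | rfl
        · exact hnm k' h
        · exact hKM k' List.mem_cons_self
      · rw [if_neg hc] at hk'
        exact hnm k' hk'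
    · intro k' q
      by_cases hkk : k' = k
      · subst hkk
        rw [e1, f1 q, List.count_append, hcnt k' q]
        have hflat : ((M.getD k' []).map (fun vm => ((g vm).count q : Int))).sum
            = (((M.getD k' []).flatMap g).count q : Int) := by
          rw [List.count_flatMap]
          push_cast
          rw [List.map_map]
          simp [Function.comp_def]
        have hw : (((B.getD k' PySem.Dict.empty).items).map
            (fun vm => vm.2 * ((g vm.1).count q : Int))).sum
            = (((M.getD k' []).flatMap g).count q : Int) := by
          rw [PySem.Dict.items_eq_map_keys _ hrownd 0, List.map_map]
          have hcomp : ((fun vm : Int × Int => vm.2 * ((g vm.1).count q : Int)) ∘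
              (fun v => (v, (B.getD k' PySem.Dict.empty).getD v 0))) =
              (fun v => ((M.getD k' []).count v : Int) * ((g v).count q : Int)) := by
            funext v
            simp [hrel.2.2.2 k' v]
          rw [hcomp, pv_weighted_count _ hrownd _ (fun v => hmemrow v) _, hflat]
        rw [hw]
        push_cast
        ring
      · rw [e2 k' hkk, f2 k' hkk, hcnt k' q]
    · exact f4
    · intro k' q hq
      by_cases hkk : k' = k
      · subst hkk
        rw [e1] at hq
        rcases List.mem_append.mp hq with h | h
        · exact hval k' q h
        · obtain ⟨val, _, hval'⟩ := List.mem_flatMap.mp h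
          exact ⟨val, hval'⟩
      · rw [e2 k' hkk] at hq
        exact hval k' q hq

-- ===== phase 3 =====
def pvSInt (L : List (Int × Int)) (x : Int) : Int :=
  (L.map (fun wa => if wa.1 = x then wa.2 else 0)).sum

theorem pvSInt_nil (x : Int) : pvSInt [] x = 0 := rfl

theorem pvSInt_not_mem {L : List (Int × Int)} {x : Int} (h : x ∉ L.map Prod.fst) :
    pvSInt L x = 0 := by
  induction L with
  | nil => rfl
  | cons wa t ih =>
    rw [List.map_cons] at h
    have h1 : wa.1 ≠ x := fun he => h (he ▸ List.mem_cons_self)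
    have h2 : x ∉ t.map Prod.fst := fun hm => h (List.mem_cons_of_mem _ hm)
    unfold pvSInt at ih ⊢
    rw [List.map_cons, List.sum_cons, if_neg h1, ih h2]
    ring

theorem pvSInt_getD (l : List (Int × Int)) (hnd : (l.map Prod.fst).Nodup) (x : Int) :
    pvSInt l x = (PySem.Dict.mk l).getD x 0 := by
  induction l with
  | nil => rfl
  | cons wa t ih =>
    rw [List.map_cons] at hnd
    have h0 := List.nodup_cons.mp hnd
    unfold pvSInt
    rw [List.map_cons, List.sum_cons]
    by_cases hx : wa.1 = x
    · rw [if_pos hx]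
      have ht : pvSInt t x = 0 := pvSInt_not_mem (hx ▸ h0.1)
      unfold pvSInt at ht
      rw [ht]
      have hg : (PySem.Dict.mk (wa :: t)).getD x 0 = wa.2 := by
        simp [PySem.Dict.getD, PySem.Dict.get?, List.find?_cons_of_pos, hx]
      rw [hg]
      ring
    · rw [if_neg hx]
      have hg : (PySem.Dict.mk (wa :: t)).getD x 0 = (PySem.Dict.mk t).getD x 0 := by
        simp [PySem.Dict.getD, PySem.Dict.get?, List.find?_cons_of_neg, hx]
      rw [hg, ← ih h0.2]
      unfold pvSInt
      ring

-- A-side step effect of the reverse-connection loop on counts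
theorem pvA3a (j : Int) (vl : List Int) (M : PySem.Dict Int (List Int)) (k q : Int) :
    (((vl.foldl (fun Mn val => Mn.modify val [] (· ++ [j])) M).getD k []).count q)
      = ((M.getD k []).count q) + (if q = j then vl.count k else 0) := by
  induction vl generalizing M with
  | nil => simp
  | cons val t ih =>
    rw [List.foldl_cons, ih, PySem.Dict.getD_modify]
    by_cases hk : k = val <;> by_cases hq : q = j <;>
      simp only [hk, hq, if_pos rfl, if_true, if_neg, List.count_append, List.count_cons,
        List.count_nil, ite_true, ite_false] <;>
      simp [hk, hq, List.count_cons] <;>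
      first
        | omega
        | (intro he; simp_all)

theorem pvSInt_cons (wa : Int × Int) (t : List (Int × Int)) (x : Int) :
    pvSInt (wa :: t) x = (if wa.1 = x then wa.2 else 0) + pvSInt t x := by
  unfold pvSInt
  rw [List.map_cons, List.sum_cons]

-- B-side step effect of the reverse-connection loop on counts
theorem pvB3 (j : Int) (L : List (Int × Int)) (Bn : PySem.Dict Int (PySem.Dict Int Int)) (k q : Int) :
    (((L.foldl (fun Bn wa =>
        (Bn.modify j PySem.Dict.empty (fun krow => krow.modify wa.1 0 (· + wa.2))).modify wa.1
          PySem.Dict.empty (fun wrow => wrow.modify j 0 (· + wa.2))) Bn).getD k PySem.Dict.empty).getD q 0)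
      = ((Bn.getD k PySem.Dict.empty).getD q 0)
        + (if k = j then pvSInt L q else 0) + (if q = j then pvSInt L k else 0) := by
  induction L generalizing Bn with
  | nil => simp [pvSInt_nil]
  | cons wa t ih =>
    rw [List.foldl_cons, ih, pvSInt_cons, pvSInt_cons]
    simp only [PySem.Dict.getD_modify]
    split_ifs <;> (try simp only [PySem.Dict.getD_modify]) <;> (try split_ifs) <;>
      (try simp only [PySem.Dict.getD_modify]) <;> (try split_ifs) <;> (try subst_vars) <;> omega

theorem pvA3keys_fold (j : Int) (vl : List Int) (Mn : PySem.Dict Int (List Int))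
    (h : ∀ v ∈ vl, v ∈ Mn.keys) :
    (vl.foldl (fun Mn val => Mn.modify val [] (· ++ [j])) Mn).keys = Mn.keys := by
  induction vl generalizing Mn with
  | nil => rfl
  | cons val t ih =>
    rw [List.foldl_cons]
    have hc : Mn.contains val = true :=
      (PySem.Dict.contains_iff_mem_keys _ _).mpr (h val List.mem_cons_self)
    have hk := pv_keys_modify_of_contains Mn ([] : List Int) (· ++ [j]) hc
    rw [ih _ (fun v hv => hk ▸ h v (List.mem_cons_of_mem _ hv)), hk]

theorem pvA3keys (j : Int) (vl : List Int) (Mn : PySem.Dict Int (List Int))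
    (hj : j ∈ Mn.keys) (hvl : ∀ v ∈ vl, v ∈ Mn.keys) :
    (vl.foldl (fun Mn val => Mn.modify val [] (· ++ [j])) (Mn.modify j [] (· ++ vl))).keys = Mn.keys := by
  have hc : Mn.contains j = true := (PySem.Dict.contains_iff_mem_keys _ _).mpr hj
  have hk := pv_keys_modify_of_contains Mn ([] : List Int) (· ++ vl) hc
  rw [pvA3keys_fold j vl _ (fun v hv => hk ▸ hvl v hv), hk]

theorem pvB3keys (j : Int) (L : List (Int × Int)) (Bn : PySem.Dict Int (PySem.Dict Int Int))
    (hj : j ∈ Bn.keys) (hL : ∀ wa ∈ L, wa.1 ∈ Bn.keys) :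
    (L.foldl (fun Bn wa =>
      (Bn.modify j PySem.Dict.empty (fun krow => krow.modify wa.1 0 (· + wa.2))).modify wa.1
        PySem.Dict.empty (fun wrow => wrow.modify j 0 (· + wa.2))) Bn).keys = Bn.keys := by
  induction L generalizing Bn with
  | nil => rfl
  | cons wa t ih =>
    rw [List.foldl_cons]
    have hc1 : Bn.contains j = true := (PySem.Dict.contains_iff_mem_keys _ _).mpr hj
    have hk1 := pv_keys_modify_of_contains Bn PySem.Dict.empty
      (fun krow => krow.modify wa.1 0 (· + wa.2)) hc1
    have hc2 : (Bn.modify j PySem.Dict.empty (fun krow => krow.modify wa.1 0 (· + wa.2))).contains wa.1 = true := by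
      apply (PySem.Dict.contains_iff_mem_keys _ _).mpr
      rw [hk1]
      exact hL wa List.mem_cons_self
    have hk2 := pv_keys_modify_of_contains _ PySem.Dict.empty
      (fun wrow => wrow.modify j 0 (· + wa.2)) hc2
    rw [ih _ (by rw [hk2, hk1]; exact hj) (fun wb hwb => by rw [hk2, hk1]; exact hL wb (List.mem_cons_of_mem _ hwb)), hk2, hk1]

theorem pvB3rowOk (j : Int) (L : List (Int × Int)) (Bn : PySem.Dict Int (PySem.Dict Int Int))
    (hpos : ∀ wa ∈ L, 0 < wa.2) (hok : ∀ k, pvRowOk (Bn.getD k PySem.Dict.empty)) :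
    ∀ k, pvRowOk ((L.foldl (fun Bn wa =>
      (Bn.modify j PySem.Dict.empty (fun krow => krow.modify wa.1 0 (· + wa.2))).modify wa.1
        PySem.Dict.empty (fun wrow => wrow.modify j 0 (· + wa.2))) Bn).getD k PySem.Dict.empty) := by
  induction L generalizing Bn with
  | nil => exact hok
  | cons wa t ih =>
    rw [List.foldl_cons]
    have hwa : 0 < wa.2 := hpos wa List.mem_cons_self
    have h1 : ∀ k, pvRowOk ((Bn.modify j PySem.Dict.empty (fun krow => krow.modify wa.1 0 (· + wa.2))).getD k PySem.Dict.empty) := by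
      intro k
      rw [PySem.Dict.getD_modify]
      by_cases hk : k = j
      · rw [if_pos hk]; exact pvRowOk_modify_add (hok j) hwa wa.1
      · rw [if_neg hk]; exact hok k
    have h2 : ∀ k, pvRowOk (((Bn.modify j PySem.Dict.empty (fun krow => krow.modify wa.1 0 (· + wa.2))).modify wa.1
        PySem.Dict.empty (fun wrow => wrow.modify j 0 (· + wa.2))).getD k PySem.Dict.empty) := by
      intro k
      rw [PySem.Dict.getD_modify]
      by_cases hk : k = wa.1
      · rw [if_pos hk]; exact pvRowOk_modify_add (h1 wa.1) hwa j
      · rw [if_neg hk]; exact h1 k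
    exact ih _ (fun wb hwb => hpos wb (List.mem_cons_of_mem _ hwb)) h2

theorem pv_items_pos {r : PySem.Dict Int Int} (hok : pvRowOk r) :
    ∀ wa ∈ r.items, 0 < wa.2 := by
  intro wa hwa
  have h1 : r.getD wa.1 0 = wa.2 := by
    obtain ⟨w1, w2⟩ := wa
    exact PySem.Dict.getD_of_mem_items _ hwa hok.1 0
  have h2 : wa.1 ∈ r.keys := List.mem_map_of_mem hwa
  have := (hok.2 wa.1).mp h2
  omega

theorem pvPhase3_outer {M : PySem.Dict Int (List Int)} {B : PySem.Dict Int (PySem.Dict Int Int)}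
    (NX : PySem.Dict Int (List Int)) (EX : PySem.Dict Int (PySem.Dict Int Int))
    (hcnt2 : ∀ k q, (EX.getD k PySem.Dict.empty).getD q 0 = ((NX.getD k []).count q : Int))
    (hok2 : ∀ k, pvRowOk (EX.getD k PySem.Dict.empty))
    (hval : ∀ k q, q ∈ NX.getD k [] → q ∈ M.keys)
    (K : List Int) (hKM : ∀ k ∈ K, k ∈ M.keys)
    {Mn : PySem.Dict Int (List Int)} {Bn : PySem.Dict Int (PySem.Dict Int Int)}
    (h : pvRel Mn Bn) (hMk : Mn.keys = M.keys) :
    pvRel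
      (K.foldl (fun Mn k => (NX.getD k []).foldl (fun Mn val => Mn.modify val [] (· ++ [k]))
        (Mn.modify k [] (· ++ NX.getD k []))) Mn)
      (K.foldl (fun Bn k => ((EX.getD k PySem.Dict.empty).items).foldl (fun Bn wa =>
        (Bn.modify k PySem.Dict.empty (fun krow => krow.modify wa.1 0 (· + wa.2))).modify wa.1
          PySem.Dict.empty (fun wrow => wrow.modify k 0 (· + wa.2))) Bn) Bn)
      ∧ (K.foldl (fun Mn k => (NX.getD k []).foldl (fun Mn val => Mn.modify val [] (· ++ [k]))
        (Mn.modify k [] (· ++ NX.getD k []))) Mn).keys = M.keys := by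
  induction K generalizing Mn Bn with
  | nil => exact ⟨h, hMk⟩
  | cons j t ih =>
    rw [List.foldl_cons, List.foldl_cons]
    set vl := NX.getD j [] with hvl
    set r := EX.getD j PySem.Dict.empty with hr
    have hjM : j ∈ M.keys := hKM j List.mem_cons_self
    have hvlM : ∀ v ∈ vl, v ∈ M.keys := fun v hv => hval j v hv
    have hrkeys : ∀ w ∈ r.keys, w ∈ M.keys := by
      intro w hw
      have hpos := ((hok2 j).2 w).mp hw
      rw [hcnt2 j w] at hpos
      exact hval j w (List.count_pos_iff.mp (by exact_mod_cast hpos))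
    have hposr : ∀ wa ∈ r.items, 0 < wa.2 := pv_items_pos (hok2 j)
    -- keys preserved by this step
    have hAkeys : ((vl.foldl (fun Mn val => Mn.modify val [] (· ++ [j]))
        (Mn.modify j [] (· ++ vl)))).keys = Mn.keys :=
      pvA3keys j vl Mn (hMk ▸ hjM) (fun v hv => hMk ▸ hvlM v hv)
    have hBkeys : ((r.items.foldl (fun Bn wa =>
        (Bn.modify j PySem.Dict.empty (fun krow => krow.modify wa.1 0 (· + wa.2))).modify wa.1
          PySem.Dict.empty (fun wrow => wrow.modify j 0 (· + wa.2))) Bn)).keys = Bn.keys := by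
      apply pvB3keys
      · rw [← h.1, hMk]; exact hjM
      · intro wa hwa
        rw [← h.1, hMk]
        exact hrkeys wa.1 (List.mem_map_of_mem hwa)
    -- counts after this step
    have hstepcnt : ∀ k q,
        (((r.items.foldl (fun Bn wa =>
          (Bn.modify j PySem.Dict.empty (fun krow => krow.modify wa.1 0 (· + wa.2))).modify wa.1
            PySem.Dict.empty (fun wrow => wrow.modify j 0 (· + wa.2))) Bn)).getD k PySem.Dict.empty).getD q 0
        = (((vl.foldl (fun Mn val => Mn.modify val [] (· ++ [j]))
            (Mn.modify j [] (· ++ vl)))).getD k []).count q := by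
      intro k q
      rw [pvB3, pvA3a]
      have hS : ∀ x, pvSInt r.items x = (vl.count x : Int) := by
        intro x
        have h1 := pvSInt_getD r.items (hok2 j).1 x
        have h2 : (PySem.Dict.mk r.items) = r := rfl
        rw [h1, h2, hcnt2 j x]
      rw [hS q, hS k, h.2.2.2 k q]
      have hmod : (Mn.modify j [] (· ++ vl)) = Mn.insert j ((Mn.getD j []) ++ vl) := rfl
      rw [hmod, PySem.Dict.getD_insert]
      by_cases hk : k = j
      · rw [if_pos hk, if_pos hk, List.count_append]
        by_cases hq : q = j <;> simp [hq, hk] <;> push_cast <;> try ring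
      · rw [if_neg hk, if_neg hk]
        by_cases hq : q = j <;> simp [hq] <;> push_cast <;> try ring
    -- rowOk after this step
    have hstepok : ∀ k, pvRowOk (((r.items.foldl (fun Bn wa =>
        (Bn.modify j PySem.Dict.empty (fun krow => krow.modify wa.1 0 (· + wa.2))).modify wa.1
          PySem.Dict.empty (fun wrow => wrow.modify j 0 (· + wa.2))) Bn)).getD k PySem.Dict.empty) :=
      pvB3rowOk j r.items Bn hposr h.2.2.1
    exact ih (fun k hk => hKM k (List.mem_cons_of_mem _ hk))
      ⟨by rw [hAkeys, hBkeys]; exact h.1, by rw [hAkeys]; exact h.2.1,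
        hstepok, fun k q => hstepcnt k q⟩
      (by rw [hAkeys]; exact hMk)

-- ===== instantiations over dict items =====
theorem pvPhase2 (g : Int → List Int) {M : PySem.Dict Int (List Int)}
    {B : PySem.Dict Int (PySem.Dict Int Int)} (hrel : pvRel M B) :
    let NA := M.items.foldl (fun New ev => ev.2.foldl
      (fun New val => if (g val).isEmpty then New else New.modify ev.1 [] (· ++ g val)) New) PySem.Dict.empty
    let EB := B.items.foldl (fun extra er => er.2.items.foldl
      (fun extra vm => if (g vm.1).isEmpty then extra else
        extra.insert er.1 ((g vm.1).foldl (fun e w => e.modify w 0 (· + vm.2)) (extra.getD er.1 PySem.Dict.empty))) extra) PySem.Dict.empty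
    NA.keys = EB.keys ∧ NA.keys.Nodup ∧ (∀ k ∈ NA.keys, k ∈ M.keys) ∧
    (∀ k q, (EB.getD k PySem.Dict.empty).getD q 0 = ((NA.getD k []).count q : Int)) ∧
    (∀ k, pvRowOk (EB.getD k PySem.Dict.empty)) ∧
    (∀ k q, q ∈ NA.getD k [] → ∃ val, q ∈ g val) := by
  have hMnd : M.keys.Nodup := hrel.2.1
  have hBnd : B.keys.Nodup := hrel.1 ▸ hrel.2.1
  have h := pvPhase2_outer g hrel M.keys hMnd (fun k hk => hk)
    (New := PySem.Dict.empty) (extra := PySem.Dict.empty)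
    rfl (by simp [PySem.Dict.keys, PySem.Dict.empty])
    (by intro k hk; simp [PySem.Dict.keys, PySem.Dict.empty] at hk)
    (by intro k q; rfl)
    (by intro k; exact pvRowOk_empty)
    (by intro k q hq; simp [PySem.Dict.getD, PySem.Dict.get?, PySem.Dict.empty] at hq)
  intro NA EB
  have hNA : NA = M.keys.foldl (fun New k => (M.getD k []).foldl
      (fun New val => if (g val).isEmpty then New else New.modify k [] (· ++ g val)) New) PySem.Dict.empty := by
    show M.items.foldl _ _ = _
    rw [PySem.Dict.items_eq_map_keys M hMnd [], List.foldl_map]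
  have hEB : EB = M.keys.foldl (fun extra k => ((B.getD k PySem.Dict.empty).items).foldl
      (fun extra vm => if (g vm.1).isEmpty then extra else
        extra.insert k ((g vm.1).foldl (fun e w => e.modify w 0 (· + vm.2)) (extra.getD k PySem.Dict.empty))) extra) PySem.Dict.empty := by
    show B.items.foldl _ _ = _
    rw [PySem.Dict.items_eq_map_keys B hBnd PySem.Dict.empty, List.foldl_map, ← hrel.1]
  rw [hNA, hEB]
  exact h

theorem pvPhase3 {M : PySem.Dict Int (List Int)} {B : PySem.Dict Int (PySem.Dict Int Int)}
    (hrel : pvRel M B) (NX : PySem.Dict Int (List Int)) (EX : PySem.Dict Int (PySem.Dict Int Int))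
    (hkeq : NX.keys = EX.keys) (hknd : NX.keys.Nodup) (hsub : ∀ k ∈ NX.keys, k ∈ M.keys)
    (hcnt2 : ∀ k q, (EX.getD k PySem.Dict.empty).getD q 0 = ((NX.getD k []).count q : Int))
    (hok2 : ∀ k, pvRowOk (EX.getD k PySem.Dict.empty))
    (hval : ∀ k q, q ∈ NX.getD k [] → q ∈ M.keys) :
    pvRel
      (NX.items.foldl (fun Mn kv => kv.2.foldl (fun Mn val => Mn.modify val [] (· ++ [kv.1]))
        (Mn.modify kv.1 [] (· ++ kv.2))) M)
      (EX.items.foldl (fun Bn ka => ka.2.items.foldl (fun Bn wa =>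
        (Bn.modify ka.1 PySem.Dict.empty (fun krow => krow.modify wa.1 0 (· + wa.2))).modify wa.1
          PySem.Dict.empty (fun wrow => wrow.modify ka.1 0 (· + wa.2))) Bn) B) := by
  have hExnd : EX.keys.Nodup := hkeq ▸ hknd
  have h := pvPhase3_outer (M := M) (B := B) NX EX hcnt2 hok2 hval NX.keys hsub hrel rfl
  have hNX : NX.items.foldl (fun Mn kv => kv.2.foldl (fun Mn val => Mn.modify val [] (· ++ [kv.1]))
        (Mn.modify kv.1 [] (· ++ kv.2))) M
      = NX.keys.foldl (fun Mn k => (NX.getD k []).foldl (fun Mn val => Mn.modify val [] (· ++ [k]))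
        (Mn.modify k [] (· ++ NX.getD k []))) M := by
    rw [PySem.Dict.items_eq_map_keys NX hknd [], List.foldl_map]
  have hEX : EX.items.foldl (fun Bn ka => ka.2.items.foldl (fun Bn wa =>
        (Bn.modify ka.1 PySem.Dict.empty (fun krow => krow.modify wa.1 0 (· + wa.2))).modify wa.1
          PySem.Dict.empty (fun wrow => wrow.modify ka.1 0 (· + wa.2))) Bn) B
      = NX.keys.foldl (fun Bn k => ((EX.getD k PySem.Dict.empty).items).foldl (fun Bn wa =>
        (Bn.modify k PySem.Dict.empty (fun krow => krow.modify wa.1 0 (· + wa.2))).modify wa.1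
          PySem.Dict.empty (fun wrow => wrow.modify k 0 (· + wa.2))) Bn) B := by
    rw [PySem.Dict.items_eq_map_keys EX hExnd PySem.Dict.empty, List.foldl_map, ← hkeq]
  rw [hNX, hEX]
  exact h.1

-- ===== final phase =====
theorem pv_filterMap_ite {α β : Type} (c : α → Prop) [DecidablePred c] (e : α → β) (K : List α) :
    K.filterMap (fun k => if c k then some (e k) else none)
      = (K.filter (fun k => decide (c k))).map e := by
  induction K with
  | nil => rfl
  | cons a t ih =>
    by_cases hc : c a
    · rw [List.filterMap_cons, List.filter_cons]
      simp [hc, ih]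
    · rw [List.filterMap_cons, List.filter_cons]
      simp [hc, ih]

theorem pv_values_sum {r : PySem.Dict Int Int} (hok : pvRowOk r) {l : List Int}
    (hc : ∀ q, r.getD q 0 = (l.count q : Int)) : r.values.sum = (l.length : Int) := by
  have hv : r.values = r.keys.map (fun k => r.getD k 0) := by
    show r.items.map (fun x => x.2) = _
    rw [PySem.Dict.items_eq_map_keys r hok.1 0, List.map_map]
    rfl
  rw [hv]
  have : r.keys.map (fun k => r.getD k 0) = r.keys.map (fun k => (l.count k : Int) * 1) := by
    apply List.map_congr_left
    intro k _
    rw [hc k]; ring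
  rw [this, pv_weighted_count r.keys hok.1 l
    (fun v => by rw [hok.2 v, hc v]; constructor
                 · intro h; exact List.count_pos_iff.mp (by exact_mod_cast h)
                 · intro h; exact_mod_cast List.count_pos_iff.mpr h) (fun _ => 1)]
  simp



theorem pvCore_eq_fix (mult : PySem.Dict Int (PySem.Dict Int Int)) (alive : List Int) :
    pvCore mult alive = pvFix (fun p => (mult.getD p PySem.Dict.empty).keys) alive := by
  induction hn : alive.length using Nat.strong_induction_on generalizing alive with
  | _ n ih =>
    rw [pvCore.eq_1, pvFix.eq_1]
    dsimp only [pvDeg]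
    split
    · rename_i hcond
      split
      · rfl
      · rename_i hne
        exact absurd hcond hne
    · rename_i hne
      split
      · rename_i hcond
        exact absurd hcond hne
      · subst hn
        exact ih _ (lt_of_le_of_ne (by simpa using List.length_filter_le _ alive) hne) _ rfl

theorem pvFinal {M2 : PySem.Dict Int (List Int)} {B2 : PySem.Dict Int (PySem.Dict Int Int)}
    (hrel : pvRel M2 B2) :
    let O2 := M2.items.filterMap (fun kv => if 1 < kv.2.length then some (kv.1, PySem.Set.ofList kv.2) else none)
    let AL := B2.items.filterMap (fun pr => if 1 < pr.2.values.sum then some pr.1 else none)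
    O2.map Prod.fst = AL ∧ (O2.map Prod.fst).Nodup ∧ (∀ kv ∈ O2, kv.2.Nodup) ∧
    (∀ p ∈ AL, ∀ q, (q ∈ pvN O2 p ↔ q ∈ (B2.getD p PySem.Dict.empty).keys)) := by
  intro O2 AL
  have hMnd : M2.keys.Nodup := hrel.2.1
  have hBnd : B2.keys.Nodup := hrel.1 ▸ hrel.2.1
  have hO2 : O2 = (M2.keys.filter (fun k => decide (1 < (M2.getD k []).length))).map
      (fun k => (k, PySem.Set.ofList (M2.getD k []))) := by
    show M2.items.filterMap _ = _
    rw [PySem.Dict.items_eq_map_keys M2 hMnd [], List.filterMap_map]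
    exact pv_filterMap_ite (fun k => 1 < (M2.getD k []).length)
      (fun k => (k, PySem.Set.ofList (M2.getD k []))) M2.keys
  have hcond : ∀ k, (decide (1 < (B2.getD k PySem.Dict.empty).values.sum))
      = (decide (1 < (M2.getD k []).length)) := by
    intro k
    rw [pv_values_sum (hrel.2.2.1 k) (fun q => hrel.2.2.2 k q)]
    exact decide_eq_decide.mpr (by exact_mod_cast Iff.rfl)
  have hAL : AL = M2.keys.filter (fun k => decide (1 < (M2.getD k []).length)) := by
    show B2.items.filterMap _ = _
    rw [PySem.Dict.items_eq_map_keys B2 hBnd PySem.Dict.empty, List.filterMap_map]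
    show (B2.keys.filterMap (fun k => if 1 < (B2.getD k PySem.Dict.empty).values.sum then some k else none)) = _
    rw [pv_filterMap_ite (c := fun k => 1 < (B2.getD k PySem.Dict.empty).values.sum) (e := fun k => k)]
    rw [show ((fun k : Int => k) = id) from rfl, List.map_id, ← hrel.1]
    exact List.filter_congr (fun k _ => hcond k)
  have hmapfst : O2.map Prod.fst = M2.keys.filter (fun k => decide (1 < (M2.getD k []).length)) := by
    rw [hO2, List.map_map]
    have hcmp : (Prod.fst ∘ fun k : Int => (k, PySem.Set.ofList (M2.getD k []))) = id := rfl
    rw [hcmp, List.map_id]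
  refine ⟨by rw [hmapfst, hAL], by rw [hmapfst]; exact List.Nodup.filter _ hMnd, ?_, ?_⟩
  · intro kv hkv
    rw [hO2] at hkv
    obtain ⟨k, _, rfl⟩ := List.mem_map.mp hkv
    exact PySem.Set.nodup_ofList _
  · intro p hp q
    rw [hAL] at hp
    have hpk : p ∈ M2.keys := List.mem_of_mem_filter hp
    have hmem : (p, PySem.Set.ofList (M2.getD p [])) ∈ O2 := by
      rw [hO2]
      exact List.mem_map_of_mem hp
    have hNeq : pvN O2 p = PySem.Set.ofList (M2.getD p []) :=
      pvN_eq (by rw [hmapfst]; exact List.Nodup.filter _ hMnd) hmem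
    rw [hNeq, PySem.Set.mem_ofList]
    constructor
    · intro hq
      apply (hrel.2.2.1 p).2 q |>.mpr
      rw [hrel.2.2.2 p q]
      exact_mod_cast List.count_pos_iff.mpr hq
    · intro hq
      have := ((hrel.2.2.1 p).2 q).mp hq
      rw [hrel.2.2.2 p q] at this
      exact List.count_pos_iff.mp (by exact_mod_cast this)

-- ===== VERDICT (by name: the statement is the Claim_ definition above) =====
theorem checkEnclosedFacesVertex_spec : Claim_equal_checkEnclosedFacesVertex := by
  intro CF vg POD _hdom _hpre
  unfold Spec_checkEnclosedFacesVertex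
  -- the A pipeline, named
  set MA : PySem.Dict Int (List Int) := CF.foldl (fun Main face =>
    let non_vg_points := face.filter (fun p => !vg.contains p)
    if 1 < non_vg_points.length then
      non_vg_points.foldl (fun Main point =>
        Main.modify point [] (· ++ non_vg_points.filter (fun x => x != point))) Main
    else Main) PySem.Dict.empty with hMAdef
  set MB : PySem.Dict Int (PySem.Dict Int Int) := CF.foldl (fun mult face =>
    let pts := face.filter (fun p => !vg.contains p)
    if 1 < pts.length then
      pts.foldl (fun mult p =>
        mult.insert p (pts.foldl (fun row q => if q != p then row.modify q 0 (· + 1) else row)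
          (mult.getD p PySem.Dict.empty))) mult
    else mult) PySem.Dict.empty with hMBdef
  set gA : Int → List Int := fun val =>
    (((PySem.Dict.mk (((PySem.Dict.mk POD).get? "Same_Vertex").getD [])).get? val).getD []).filter (fun x => x != val)
      |>.filter (fun x => MA.contains x) with hgAdef
  set gB : Int → List Int := fun val =>
    (((PySem.Dict.mk (((PySem.Dict.mk POD).get? "Same_Vertex").getD [])).get? val).getD []).filter (fun x => x != val)
      |>.filter (fun x => MB.contains x) with hgBdef
  set NA : PySem.Dict Int (List Int) := MA.items.foldl (fun New ev => ev.2.foldl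
    (fun New val => if (gA val).isEmpty then New else New.modify ev.1 [] (· ++ gA val)) New)
    PySem.Dict.empty with hNAdef
  set EBa : PySem.Dict Int (PySem.Dict Int Int) := MB.items.foldl (fun extra er => er.2.items.foldl
    (fun extra vm => if (gA vm.1).isEmpty then extra else
      extra.insert er.1 ((gA vm.1).foldl (fun e w => e.modify w 0 (· + vm.2)) (extra.getD er.1 PySem.Dict.empty))) extra)
    PySem.Dict.empty with hEBadef
  set EB : PySem.Dict Int (PySem.Dict Int Int) := MB.items.foldl (fun extra er => er.2.items.foldl
    (fun extra vm => if (gB vm.1).isEmpty then extra else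
      extra.insert er.1 ((gB vm.1).foldl (fun e w => e.modify w 0 (· + vm.2)) (extra.getD er.1 PySem.Dict.empty))) extra)
    PySem.Dict.empty with hEBdef
  set M2A : PySem.Dict Int (List Int) := NA.items.foldl (fun Mn kv =>
    kv.2.foldl (fun Mn val => Mn.modify val [] (· ++ [kv.1])) (Mn.modify kv.1 [] (· ++ kv.2))) MA with hM2Adef
  set M2Ba : PySem.Dict Int (PySem.Dict Int Int) := EBa.items.foldl (fun Bn ka =>
    ka.2.items.foldl (fun Bn wa =>
      (Bn.modify ka.1 PySem.Dict.empty (fun krow => krow.modify wa.1 0 (· + wa.2))).modify wa.1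
        PySem.Dict.empty (fun wrow => wrow.modify ka.1 0 (· + wa.2))) Bn) MB with hM2Badef
  set M2B : PySem.Dict Int (PySem.Dict Int Int) := EB.items.foldl (fun Bn ka =>
    ka.2.items.foldl (fun Bn wa =>
      (Bn.modify ka.1 PySem.Dict.empty (fun krow => krow.modify wa.1 0 (· + wa.2))).modify wa.1
        PySem.Dict.empty (fun wrow => wrow.modify ka.1 0 (· + wa.2))) Bn) MB with hM2Bdef
  set O2 : List (Int × List Int) := M2A.items.filterMap (fun kv =>
    if 1 < kv.2.length then some (kv.1, PySem.Set.ofList kv.2) else none) with hO2def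
  set ALa : List Int := M2Ba.items.filterMap (fun pr =>
    if 1 < pr.2.values.sum then some pr.1 else none) with hALadef
  set AL : List Int := M2B.items.filterMap (fun pr =>
    if 1 < pr.2.values.sum then some pr.1 else none) with hALdef
  -- the ports compute exactly these pipelines
  have hA : checkEnclosedFacesVertex CF vg POD = pvRecConn O2 := rfl
  have hB : checkEnclosedFacesVertex_alt CF vg POD =
      (decide (3 ≤ (pvCore M2B AL).length) || decide ((pvCore M2B AL).length = AL.length)) := rfl
  -- phase 1
  have h1 : pvRel MA MB := pvPhase1 CF vg pvRel_empty
  have hfun : (fun x => MB.contains x) = (fun x => MA.contains x) :=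
    funext fun x => (pvRel_contains_eq h1 x).symm
  have hgeq : gB = gA := by rw [hgBdef, hgAdef, hfun]
  -- phase 2
  have hP2 := pvPhase2 gA h1
  have p21 : NA.keys = EBa.keys := hP2.1
  have p22 : NA.keys.Nodup := hP2.2.1
  have p23 : ∀ k ∈ NA.keys, k ∈ MA.keys := hP2.2.2.1
  have p24 : ∀ k q, (EBa.getD k PySem.Dict.empty).getD q 0 = ((NA.getD k []).count q : Int) := hP2.2.2.2.1
  have p25 : ∀ k, pvRowOk (EBa.getD k PySem.Dict.empty) := hP2.2.2.2.2.1
  have p26 : ∀ k q, q ∈ NA.getD k [] → ∃ val, q ∈ gA val := hP2.2.2.2.2.2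
  have hgsub : ∀ val q, q ∈ gA val → q ∈ MA.keys := by
    intro val q hq
    rw [hgAdef] at hq
    exact (PySem.Dict.contains_iff_mem_keys _ _).mp (List.of_mem_filter hq)
  -- phase 3
  have h3 : pvRel M2A M2Ba := pvPhase3 h1 NA EBa p21 p22 p23 p24 p25
    (fun k q hq => by obtain ⟨val, hv⟩ := p26 k q hq; exact hgsub val q hv)
  have hEBeq : EB = EBa := by rw [hEBdef, hEBadef, hgeq]
  have hM2Beq : M2B = M2Ba := by rw [hM2Bdef, hM2Badef, hEBeq]
  have hALeq : AL = ALa := by rw [hALdef, hALadef, hM2Beq]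
  -- final phase
  have hF := pvFinal h3
  have f1 : O2.map Prod.fst = ALa := hF.1
  have f2 : (O2.map Prod.fst).Nodup := hF.2.1
  have f3 : ∀ kv ∈ O2, kv.2.Nodup := hF.2.2.1
  have f4 : ∀ p ∈ ALa, ∀ q, (q ∈ pvN O2 p ↔ q ∈ (M2Ba.getD p PySem.Dict.empty).keys) := hF.2.2.2
  rw [hA, hB, hM2Beq, hALeq, pvCore_eq_fix M2Ba ALa, pvRecConn_eq O2 f2 f3, f1]
  have hfix : pvFix (pvN O2) ALa = pvFix (fun p => (M2Ba.getD p PySem.Dict.empty).keys) ALa :=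
    pvFix_congr ALa (fun p hp q => f4 p hp q)
      (fun p _ => pvN_nodup f3 p)
      (fun p _ => (h3.2.2.1 p).1)
  rw [hfix]
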